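-- pv_equiv track=rewrite | github.com/sunny-ops/Amazon_OA | Maximum Number of Balanced Shipments.py | maxNumberOfBalancedShipments1
-- ===== SOURCE A (Python) =====
-- def maxNumberOfBalancedShipments1(weight):
--     n = len(weight)
--     f = [None for i in range(n + 1)]
--     g = [None for i in range(n + 1)]
--     h = [None for i in range(n)]
--
--     st = []
--     stsize = 0
--     for i in range(n - 1, -1, -1):
--         while stsize > 0 and weight[st[-1]] < weight[i]:
--             h[st[-1]] = i
--             stsize -= 1
--             st.pop()
--         st.append(i)
--         stsize += 1
--
--     f[0] = 0
--     g[0] = 0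
--     for i in range(1, n + 1):
--         f[i] = 0
--         if h[i - 1] != None:
--             f[i] = 1 + g[h[i - 1]]
--         g[i] = max(g[i - 1], f[i])
--
--     return f[n]
-- ===== SOURCE B (Python) =====
-- def maxNumberOfBalancedShipments1(weight):
--     n = len(weight)
--     # nearest index j < n-1 with weight[j] > weight[n-1] (backward scan)
--     j = None
--     for k in range(n - 2, -1, -1):
--         if weight[k] > weight[n - 1]:
--             j = k
--             break
--     if j is None:
--         return 0
--     # greedy count of balanced shipments over the prefix weight[:j]
--     count = 0
--     cur = None  # max of the current open segment (None = no open segment)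
--     for w in weight[:j]:
--         if cur is not None and w < cur:
--             count += 1
--             cur = None
--         elif cur is None or w > cur:
--             cur = w
--     return 1 + count
-- ===== Notes on version B (the rewrite author's own statement) =====
-- stated objective: simpler
-- what changed: Replaces A's right-to-left monotonic stack, the previous-greater table h and the two DP arrays f/g by a backward scan for the previous strictly-greater index of the last element followed by a single greedy left-to-right counting pass over the prefix before that index (proved equal to the DP optimum).
import Mathlib
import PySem

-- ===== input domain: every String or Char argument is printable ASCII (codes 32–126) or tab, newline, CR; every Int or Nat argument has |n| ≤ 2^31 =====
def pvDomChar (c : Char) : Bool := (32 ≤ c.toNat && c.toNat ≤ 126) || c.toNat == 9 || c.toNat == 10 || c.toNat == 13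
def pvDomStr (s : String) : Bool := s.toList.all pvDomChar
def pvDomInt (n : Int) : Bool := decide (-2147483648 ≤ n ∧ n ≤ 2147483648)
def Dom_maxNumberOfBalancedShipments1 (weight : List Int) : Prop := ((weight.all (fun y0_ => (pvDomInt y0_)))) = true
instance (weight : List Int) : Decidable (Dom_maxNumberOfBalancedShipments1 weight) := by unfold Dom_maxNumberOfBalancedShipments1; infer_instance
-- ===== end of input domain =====

-- B replaces A's monotonic stack, prev-greater table and DP arrays by a backward scan for the previous
-- strictly-greater index of the last element plus one greedy left-to-right counting pass (simpler; the
-- timing run also measured it faster by a constant factor).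


-- ===== PORT A =====
-- the inner 'while stsize > 0 and weight[st[-1]] < weight[i]' loop; the stack 'st' is held head = top
-- (st.append = cons, st[-1] = head, st.pop = tail); 'stsize' always equals len(st), so 'stsize > 0'
-- is 'st ≠ []'.  The weight[…] indices are always in range here, so pyGetD is exact.
def pvA_while (weight : List Int) (i : Int) : List (Option Int) → List Int → List (Option Int) × List Int
  | h, [] => (h, [])
  | h, top :: rest =>
    if PySem.List.pyGetD weight top 0 < PySem.List.pyGetD weight i 0 then
      pvA_while weight i (PySem.List.pySetD h top (some i)) rest
    else (h, top :: rest)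

def maxNumberOfBalancedShipments1 (weight : List Int) : Int :=
  let n : Int := PySem.List.len weight
  -- h = [None]*n; f and g start as [None]*(n+1) with f[0] = g[0] = 0 set before the second loop
  let h0 : List (Option Int) := List.replicate n.toNat none
  -- for i in range(n-1, -1, -1): pop loop, then st.append(i)
  let hst := (PySem.List.pyRange (n-1) (-1) (-1)).foldl
    (fun (s : List (Option Int) × List Int) i =>
      let s' := pvA_while weight i s.1 s.2
      (s'.1, i :: s'.2))
    (h0, [])
  let h := hst.1
  let f0 := PySem.List.pySetD (List.replicate (n+1).toNat (none : Option Int)) 0 (some 0)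
  let g0 := PySem.List.pySetD (List.replicate (n+1).toNat (none : Option Int)) 0 (some 0)
  -- for i in range(1, n+1): f[i] = 0, resp. 1 + g[h[i-1]] if h[i-1] != None; g[i] = max(g[i-1], f[i]).
  -- Entries are always assigned before they are read, so the Option unwrap '.getD 0' never meets a
  -- None on which Python would crash.
  let fg := (PySem.List.pyRange 1 (n+1) 1).foldl
    (fun (s : List (Option Int) × List (Option Int)) i =>
      let fi : Int :=
        match PySem.List.pyGetD h (i-1) none with
        | some hv => 1 + (PySem.List.pyGetD s.2 hv none).getD 0
        | none => 0
      let f' := PySem.List.pySetD s.1 i (some fi)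
      let gi := max ((PySem.List.pyGetD s.2 (i-1) none).getD 0) fi
      (f', PySem.List.pySetD s.2 i (some gi)))
    (f0, g0)
  (PySem.List.pyGetD fg.1 n none).getD 0

-- ===== PORT B =====
-- greedy step of Source B's second loop: state = (count, cur); cur = None ↔ no open segment
def pvB_step (s : Int × Option Int) (w : Int) : Int × Option Int :=
  match s.2 with
  | some cur => if w < cur then (s.1 + 1, none) else if w > cur then (s.1, some w) else (s.1, some cur)
  | none => (s.1, some w)

def maxNumberOfBalancedShipments1_alt (weight : List Int) : Int :=
  let n : Int := PySem.List.len weight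
  -- 'for k in range(n-2, -1, -1): if weight[k] > weight[n-1]: j = k; break' = find? over the range
  let j : Option Int := (PySem.List.pyRange (n-2) (-1) (-1)).find?
    (fun k => decide (PySem.List.pyGetD weight (n-1) 0 < PySem.List.pyGetD weight k 0))
  match j with
  | none => 0
  | some j =>
    -- greedy pass over weight[:j]
    let r := (PySem.List.slice weight (some 0) (some j)).foldl pvB_step (0, none)
    1 + r.1

-- ===== PRECONDITION & SPEC =====
def Spec_maxNumberOfBalancedShipments1 (weight : List Int) (out : Int) : Prop := out = maxNumberOfBalancedShipments1_alt weight
instance (weight : List Int) (out : Int) : Decidable (Spec_maxNumberOfBalancedShipments1 weight out) := by unfold Spec_maxNumberOfBalancedShipments1; infer_instance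

-- ===== CLAIM (what is proved, stated in full; the proofs are below) =====
def Claim_equal_maxNumberOfBalancedShipments1 : Prop := ∀ (weight : List Int), Dom_maxNumberOfBalancedShipments1 weight → Spec_maxNumberOfBalancedShipments1 weight (maxNumberOfBalancedShipments1 weight)

-- ===== LEMMAS AND PROOFS =====

def pvPGV (w : List Int) (x : Int) (i : Nat) : Option Nat :=
  (List.range i).reverse.find? (fun j => decide (x < w.getD j 0))

theorem pvPGV_succ (w : List Int) (x : Int) (i : Nat) :
    pvPGV w x (i+1) = if x < w.getD i 0 then some i else pvPGV w x i := by
  unfold pvPGV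
  rw [List.range_succ, List.reverse_append]
  simp [List.find?]
  split_ifs with h <;> simp [h]

theorem pvPGV_some (w : List Int) (x : Int) (i j : Nat) (h : pvPGV w x i = some j) :
    j < i ∧ x < w.getD j 0 ∧ ∀ t, j < t → t < i → ¬ x < w.getD t 0 := by
  induction i with
  | zero => simp [pvPGV] at h
  | succ i ih =>
    rw [pvPGV_succ] at h
    split_ifs at h with hc
    · cases h; exact ⟨Nat.lt_succ_self _, hc, by omega⟩
    · obtain ⟨h1, h2, h3⟩ := ih h
      refine ⟨by omega, h2, ?_⟩
      intro t ht1 ht2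
      rcases Nat.lt_succ_iff_lt_or_eq.mp ht2 with h' | h'
      · exact h3 t ht1 h'
      · subst h'; exact hc
theorem pvPGV_none (w : List Int) (x : Int) (i : Nat) (h : pvPGV w x i = none) :
    ∀ t, t < i → ¬ x < w.getD t 0 := by
  induction i with
  | zero => omega
  | succ i ih =>
    rw [pvPGV_succ] at h
    split_ifs at h with hc
    · intro t ht
      rcases Nat.lt_succ_iff_lt_or_eq.mp ht with h' | h'
      · exact ih h t h'
      · subst h'; exact hc

theorem pvPGV_eq_some_of (w : List Int) (x : Int) (i j : Nat) (h1 : j < i)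
    (h2 : x < w.getD j 0) (h3 : ∀ t, j < t → t < i → ¬ x < w.getD t 0) :
    pvPGV w x i = some j := by
  induction i with
  | zero => omega
  | succ i ih =>
    rw [pvPGV_succ]
    by_cases hc : x < w.getD i 0
    · have hji : j = i := by
        by_contra hne
        exact h3 i (by omega) (by omega) hc
      rw [if_pos hc, hji]
    · rw [if_neg hc]
      have hne : j ≠ i := fun he => hc (he ▸ h2)
      exact ih (by omega) (fun t ht1 ht2 => h3 t ht1 (by omega))

def pvPG (w : List Int) (i : Nat) : Option Nat := pvPGV w (w.getD i 0) i

def pvGdp (w : List Int) : Nat → Int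
  | 0 => 0
  | i+1 => max (pvGdp w i) (match pvPGV w (w.getD i 0) i with
      | some j => 1 + pvGdp w (min j i)
      | none => 0)
decreasing_by all_goals omega

def pvFn (w : List Int) (i : Nat) : Int :=
  match pvPG w i with | some j => 1 + pvGdp w j | none => 0

theorem pvGdp_succ (w : List Int) (i : Nat) :
    pvGdp w (i+1) = max (pvGdp w i) (pvFn w i) := by
  rw [pvGdp, pvFn, pvPG]
  cases h : pvPGV w (w.getD i 0) i with
  | none => rfl
  | some j =>
    have := (pvPGV_some w _ i j h).1
    simp [Nat.min_eq_left (by omega : j ≤ i)]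

def pvSt (w : List Int) (i : Nat) : Int × Option Int := (w.take i).foldl pvB_step (0, none)

theorem pvSt_succ (w : List Int) (i : Nat) (hi : i < w.length) :
    pvSt w (i+1) = pvB_step (pvSt w i) (w.getD i 0) := by
  unfold pvSt
  rw [List.take_add_one, List.foldl_append]
  simp [List.getD, List.getElem?_eq_getElem hi]

-- each step raises the count by 0 or 1
theorem pvSt_count_step (w : List Int) (i : Nat) (hi : i < w.length) :
    (pvSt w i).1 ≤ (pvSt w (i+1)).1 ∧ (pvSt w (i+1)).1 ≤ (pvSt w i).1 + 1 := by
  rw [pvSt_succ w i hi]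
  rcases h : (pvSt w i).2 with _ | cur
  · simp [pvB_step, h]
  · simp [pvB_step, h]
    split_ifs <;> simp

theorem pvSt_mono (w : List Int) (i j : Nat) (hij : i ≤ j) (hj : j ≤ w.length) :
    (pvSt w i).1 ≤ (pvSt w j).1 := by
  induction j with
  | zero => interval_cases i; exact le_refl _
  | succ j ih =>
    by_cases hc : i = j + 1
    · subst hc; exact le_refl _
    · exact le_trans (ih (by omega) (by omega)) (pvSt_count_step w j (by omega)).1

theorem pvSt_nonneg (w : List Int) (i : Nat) (hi : i ≤ w.length) : 0 ≤ (pvSt w i).1 := by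
  have := pvSt_mono w 0 i (by omega) hi
  simpa [pvSt] using this

theorem pvB_step_none (s : Int × Option Int) (x : Int) (hs : s.2 = none) :
    pvB_step s x = (s.1, some x) := by simp [pvB_step, hs]
theorem pvB_step_lt (s : Int × Option Int) (x cur : Int) (hs : s.2 = some cur)
    (h : x < cur) : pvB_step s x = (s.1 + 1, none) := by simp [pvB_step, hs, h]
theorem pvB_step_gt (s : Int × Option Int) (x cur : Int) (hs : s.2 = some cur)
    (h1 : ¬ x < cur) (h2 : x > cur) : pvB_step s x = (s.1, some x) := by
  simp [pvB_step, hs, h1, h2]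
theorem pvB_step_stay (s : Int × Option Int) (x cur : Int) (hs : s.2 = some cur)
    (h1 : ¬ x < cur) (h2 : ¬ x > cur) : pvB_step s x = (s.1, some cur) := by
  simp [pvB_step, hs, h1, h2]

theorem pvSt_segmax (w : List Int) : ∀ i j, j < i → i ≤ w.length →
    (pvSt w j).1 = (pvSt w i).1 → ∃ v, (pvSt w i).2 = some v ∧ w.getD j 0 ≤ v := by
  intro i
  induction i with
  | zero => omega
  | succ i ih =>
    intro j hj hi hc
    have hstep := pvSt_succ w i (by omega)
    by_cases hji : j = i
    · subst hji
      rcases hm : (pvSt w j).2 with _ | cur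
      · rw [hstep, pvB_step_none _ _ hm]
        exact ⟨w.getD j 0, rfl, le_refl _⟩
      · by_cases hlt : w.getD j 0 < cur
        · rw [hstep, pvB_step_lt _ _ _ hm hlt] at hc; simp at hc
        · by_cases hgt : w.getD j 0 > cur
          · rw [hstep, pvB_step_gt _ _ _ hm hlt hgt]
            exact ⟨w.getD j 0, rfl, le_refl _⟩
          · rw [hstep, pvB_step_stay _ _ _ hm hlt hgt]
            exact ⟨cur, rfl, by omega⟩
    · have hci : (pvSt w j).1 = (pvSt w i).1 := by
        have h1 := pvSt_mono w j i (by omega) (by omega)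
        have h2 := (pvSt_count_step w i (by omega)).1
        omega
      obtain ⟨v, hv, hle⟩ := ih j (by omega) (by omega) hci
      by_cases hlt : w.getD i 0 < v
      · rw [hstep, pvB_step_lt _ _ _ hv hlt] at hc; simp at hc; omega
      · by_cases hgt : w.getD i 0 > v
        · rw [hstep, pvB_step_gt _ _ _ hv hlt hgt]
          exact ⟨w.getD i 0, rfl, by omega⟩
        · rw [hstep, pvB_step_stay _ _ _ hv hlt hgt]
          exact ⟨v, rfl, hle⟩

theorem pvSt_mwitness (w : List Int) : ∀ i, i ≤ w.length → ∀ v, (pvSt w i).2 = some v →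
    ∃ p, p < i ∧ w.getD p 0 = v ∧ (pvSt w p).1 = (pvSt w i).1 := by
  intro i
  induction i with
  | zero => intro _ v hv; simp [pvSt] at hv
  | succ i ih =>
    intro hi v hv
    have hstep := pvSt_succ w i (by omega)
    rcases hm : (pvSt w i).2 with _ | cur
    · rw [hstep, pvB_step_none _ _ hm] at hv ⊢
      exact ⟨i, by omega, Option.some.inj hv, rfl⟩
    · by_cases hlt : w.getD i 0 < cur
      · rw [hstep, pvB_step_lt _ _ _ hm hlt] at hv; exact absurd hv (by simp)
      · by_cases hgt : w.getD i 0 > cur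
        · rw [hstep, pvB_step_gt _ _ _ hm hlt hgt] at hv ⊢
          exact ⟨i, by omega, Option.some.inj hv, rfl⟩
        · rw [hstep, pvB_step_stay _ _ _ hm hlt hgt] at hv ⊢
          obtain ⟨p, hp1, hp2, hp3⟩ := ih (by omega) cur hm
          exact ⟨p, by omega, by rw [← Option.some.inj hv]; exact hp2, hp3⟩

theorem pvPG_exists_ge (w : List Int) (p i : Nat) (hp : p < i)
    (hgt : w.getD i 0 < w.getD p 0) : ∃ j, pvPG w i = some j ∧ p ≤ j := by
  cases h : pvPG w i with
  | none => exact absurd hgt (pvPGV_none w _ i h p hp)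
  | some j =>
    obtain ⟨h1, h2, h3⟩ := pvPGV_some w _ i j h
    by_cases hjp : j < p
    · exact absurd hgt (h3 p hjp hp)
    · exact ⟨j, rfl, by omega⟩

theorem pvGdp_eq_pvSt (w : List Int) : ∀ i, i ≤ w.length → pvGdp w i = (pvSt w i).1 := by
  intro i
  induction i using Nat.strong_induction_on with
  | _ i ih =>
    match i with
    | 0 => intro _; simp [pvGdp, pvSt]
    | Nat.succ i =>
      intro hi
      have hstep := pvSt_succ w i (by omega)
      have ihi := ih i (by omega) (by omega)
      rw [pvGdp_succ]
      apply le_antisymm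
      · apply max_le
        · rw [ihi]; exact (pvSt_count_step w i (by omega)).1
        · unfold pvFn
          cases hpg : pvPG w i with
          | none => exact pvSt_nonneg w (i+1) hi
          | some j =>
            obtain ⟨hji, hwj, _⟩ := pvPGV_some w _ i j hpg
            have ihj := ih j (by omega) (by omega)
            show 1 + pvGdp w j ≤ (pvSt w (i+1)).1
            by_cases hc : (pvSt w j).1 = (pvSt w i).1
            · obtain ⟨v, hv, hle⟩ := pvSt_segmax w i j hji (by omega) hc
              have hlt : w.getD i 0 < v := lt_of_lt_of_le hwj hle
              rw [hstep, pvB_step_lt _ _ _ hv hlt]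
              simp; omega
            · have hmono := pvSt_mono w j i (by omega) (by omega)
              have := (pvSt_count_step w i (by omega)).1
              omega
      · rcases hm : (pvSt w i).2 with _ | cur
        · rw [hstep, pvB_step_none _ _ hm]
          exact le_max_of_le_left (le_of_eq ihi.symm)
        · by_cases hlt : w.getD i 0 < cur
          · rw [hstep, pvB_step_lt _ _ _ hm hlt]
            obtain ⟨p, hp1, hp2, hp3⟩ := pvSt_mwitness w i (by omega) cur hm
            obtain ⟨j, hj, hpj⟩ := pvPG_exists_ge w p i hp1 (by rw [hp2]; exact hlt)
            have hji := (pvPGV_some w _ i j hj).1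
            have ihj := ih j (by omega) (by omega)
            have hcp : (pvSt w p).1 ≤ (pvSt w j).1 := pvSt_mono w p j hpj (by omega)
            apply le_max_of_le_right
            rw [pvFn, hj]
            simp
            omega
          · by_cases hgt : w.getD i 0 > cur
            · rw [hstep, pvB_step_gt _ _ _ hm hlt hgt]
              exact le_max_of_le_left (le_of_eq ihi.symm)
            · rw [hstep, pvB_step_stay _ _ _ hm hlt hgt]
              exact le_max_of_le_left (le_of_eq ihi.symm)

def pvStackN (w : List Int) (i : Nat) : List Nat :=
  (List.range' i (w.length - i)).filter
    (fun k => decide (∀ t, t < k → i ≤ t → w.getD t 0 ≤ w.getD k 0))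
def pvStack (w : List Int) (i : Nat) : List Int := (pvStackN w i).map (fun (k : Nat) => (k : Int))
def pvHArr (w : List Int) (i : Nat) : List (Option Int) :=
  (List.range w.length).map (fun k => match pvPG w k with
    | some j => if i ≤ j then some ((j : Int)) else none
    | none => none)

-- the while loop pops the maximal prefix of smaller-weight indices, writing h[k] = i for each
theorem pvA_while_eq_nat (w : List Int) (i : Nat) (h : List (Option Int)) (stN : List Nat) :
    pvA_while w (i:Int) h (stN.map (fun (k : Nat) => (k : Int))) =
      ((stN.takeWhile (fun k => decide (w.getD k 0 < w.getD i 0))).foldl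
          (fun h k => h.set k (some ((i:Nat):Int))) h,
       (stN.dropWhile (fun k => decide (w.getD k 0 < w.getD i 0))).map (fun (k : Nat) => (k : Int))) := by
  induction stN generalizing h with
  | nil => simp [pvA_while]
  | cons top rest ih =>
    rw [List.map_cons, pvA_while]
    simp only [List.getD_eq_getElem?_getD]
    by_cases hc : w[top]?.getD 0 < w[i]?.getD 0
    · rw [if_pos (by simpa [List.getD_eq_getElem?_getD] using hc)]
      rw [ih]
      simp [List.getD_eq_getElem?_getD, hc]
    · rw [if_neg (by simpa [List.getD_eq_getElem?_getD] using hc)]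
      simp [hc]

theorem pvTakeWhile_filter {α : Type} (p : α → Bool) (l : List α)
    (hp : l.Pairwise (fun a b => p b = true → p a = true)) :
    l.takeWhile p = l.filter p ∧ l.dropWhile p = l.filter (fun k => !p k) := by
  induction l with
  | nil => simp
  | cons a l ih =>
    obtain ⟨ha, hl⟩ := List.pairwise_cons.mp hp
    obtain ⟨ih1, ih2⟩ := ih hl
    by_cases hc : p a
    · simp [hc, ih1, ih2]
    · have h1 : l.filter p = [] := by
        rw [List.filter_eq_nil_iff]
        intro b hb hpb
        exact hc (ha b hb hpb)
      have h2 : l.filter (fun k => !p k) = l := by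
        rw [List.filter_eq_self]
        intro b hb
        simp only [Bool.not_eq_true']
        by_contra hpb
        exact hc (ha b hb (by simpa using hpb))
      simp [hc, h1, h2]

def pvPoppedN (w : List Int) (i : Nat) : List Nat :=
  (pvStackN w (i+1)).filter (fun k => decide (w.getD k 0 < w.getD i 0))

theorem pvMem_stackN (w : List Int) (i q : Nat) (hi : i ≤ w.length) :
    q ∈ pvStackN w i ↔ (i ≤ q ∧ q < w.length ∧ ∀ t, t < q → i ≤ t → w.getD t 0 ≤ w.getD q 0) := by
  unfold pvStackN
  rw [List.mem_filter, List.mem_range'_1]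
  constructor
  · rintro ⟨⟨h1, h2⟩, h3⟩
    exact ⟨h1, by omega, by simpa using h3⟩
  · rintro ⟨h1, h2, h3⟩
    exact ⟨⟨h1, by omega⟩, by simpa using h3⟩

theorem pvMem_popped (w : List Int) (i q : Nat) (hi : i < w.length) :
    q ∈ pvPoppedN w i ↔ (q < w.length ∧ pvPG w q = some i) := by
  unfold pvPoppedN
  rw [List.mem_filter, pvMem_stackN w (i+1) q (by omega)]
  constructor
  · rintro ⟨⟨h1, h2, h3⟩, h4⟩
    refine ⟨h2, pvPGV_eq_some_of w _ q i (by omega) (by simpa using h4) ?_⟩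
    intro t ht1 ht2
    exact not_lt_of_ge (h3 t ht2 (by omega))
  · rintro ⟨h1, h2⟩
    obtain ⟨hq1, hq2, hq3⟩ := pvPGV_some w _ q i h2
    refine ⟨⟨by omega, h1, ?_⟩, by simpa using hq2⟩
    intro t ht1 ht2
    have := hq3 t (by omega) ht1
    omega

theorem pvFoldl_set_getElem? (ps : List Nat) (h : List (Option Int)) (v : Option Int) (q : Nat) :
    (ps.foldl (fun h k => h.set k v) h)[q]? =
      if q ∈ ps ∧ q < h.length then some v else h[q]? := by
  induction ps generalizing h with
  | nil => simp
  | cons a ps ih =>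
    simp only [List.foldl_cons, ih, List.length_set]
    by_cases hm : q ∈ ps
    · by_cases hq : q < h.length <;> simp [hm, hq]
    · simp only [hm, false_and, if_false]
      rw [List.getElem?_set]
      by_cases ha : a = q
      · subst ha
        by_cases hq : a < h.length <;> simp [hm, hq]
      · have ha' : ¬ q = a := fun he => ha he.symm
        simp [ha, ha', hm]

theorem pvStackN_step (w : List Int) (i : Nat) (hi : i < w.length) :
    pvStackN w i = i :: (pvStackN w (i+1)).filter (fun k => !(decide (w.getD k 0 < w.getD i 0))) := by
  unfold pvStackN
  have hn : w.length - i = (w.length - (i+1)) + 1 := by omega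
  rw [hn, List.range'_succ, List.filter_cons]
  have hci : (decide (∀ t, t < i → i ≤ t → w.getD t 0 ≤ w.getD i 0)) = true := by
    simp; omega
  rw [if_pos hci, List.filter_filter]
  congr 1
  apply List.filter_congr
  intro a hma
  have ha1 : i + 1 ≤ a := (List.mem_range'_1.mp hma).1
  rw [Bool.eq_iff_iff]
  simp only [decide_eq_true_eq, Bool.and_eq_true, Bool.not_eq_true', decide_eq_false_iff_not, not_lt]
  constructor
  · intro hC
    exact ⟨hC i (by omega) (by omega), fun t ht1 ht2 => hC t ht1 (by omega)⟩
  · rintro ⟨hnp, hC1⟩ t ht1 ht2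
    by_cases hti : t = i
    · subst hti; exact hnp
    · exact hC1 t ht1 (by omega)

theorem pvHArr_step (w : List Int) (i : Nat) (hi : i < w.length) :
    ((pvPoppedN w i).foldl (fun h k => h.set k (some ((i : Nat) : Int))) (pvHArr w (i+1)))
      = pvHArr w i := by
  apply List.ext_getElem?
  intro q
  rw [pvFoldl_set_getElem?]
  have hlen : (pvHArr w (i+1)).length = w.length := by unfold pvHArr; simp
  by_cases hq : q < w.length
  · have hget : ∀ m : Nat, (pvHArr w m)[q]? = some (match pvPG w q with
        | some j => if m ≤ j then some ((j : Int)) else none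
        | none => none) := by
      intro m
      unfold pvHArr
      rw [List.getElem?_map, List.getElem?_range hq]
      rfl
    rw [hget, hget]
    by_cases hmem : q ∈ pvPoppedN w i
    · have hpg : pvPG w q = some i := ((pvMem_popped w i q hi).mp hmem).2
      simp [hmem, hlen, hq, hpg]
    · rw [if_neg (by tauto)]
      cases hpg : pvPG w q with
      | none => rfl
      | some j =>
        have hji : j ≠ i := by
          intro he
          exact hmem ((pvMem_popped w i q hi).mpr ⟨hq, by rw [hpg, he]⟩)
        have : (i + 1 ≤ j) = (i ≤ j) := by
          rw [eq_iff_iff]; omega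
        simp [this]
  · have h1 : ¬ (q ∈ pvPoppedN w i ∧ q < (pvHArr w (i+1)).length) := by
      rw [hlen]; tauto
    rw [if_neg h1]
    have h2 : ∀ m : Nat, (pvHArr w m)[q]? = none := by
      intro m
      unfold pvHArr
      rw [List.getElem?_map, (by simp; omega : (List.range w.length)[q]? = none)]
      rfl
    rw [h2, h2]

theorem pvStep_eq (w : List Int) (i : Nat) (hi : i < w.length) :
    ((pvA_while w (i:Int) (pvHArr w (i+1)) (pvStack w (i+1))).1,
      ((i:Int) :: (pvA_while w (i:Int) (pvHArr w (i+1)) (pvStack w (i+1))).2))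
      = (pvHArr w i, pvStack w i) := by
  unfold pvStack
  rw [pvA_while_eq_nat]
  have hpair : (pvStackN w (i+1)).Pairwise (fun a b =>
      (fun k => decide (w.getD k 0 < w.getD i 0)) b = true → (fun k => decide (w.getD k 0 < w.getD i 0)) a = true) := by
    have hlt : (pvStackN w (i+1)).Pairwise (· < ·) :=
      List.Pairwise.sublist (List.filter_sublist ..) (List.pairwise_lt_range' 1)
    refine List.Pairwise.imp_of_mem ?_ hlt
    intro a b ha hb hab hpb
    obtain ⟨hb1, hb2, hb3⟩ := (pvMem_stackN w (i+1) b (by omega)).mp hb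
    obtain ⟨ha1, _, _⟩ := (pvMem_stackN w (i+1) a (by omega)).mp ha
    have hwab : w.getD a 0 ≤ w.getD b 0 := hb3 a hab ha1
    simp only [decide_eq_true_eq] at hpb ⊢
    omega
  obtain ⟨htw, hdw⟩ := pvTakeWhile_filter _ _ hpair
  rw [htw, hdw]
  refine Prod.ext ?_ ?_
  · exact pvHArr_step w i hi
  · show (i:Int) :: ((pvStackN w (i+1)).filter _).map _ = _
    rw [← List.map_cons, ← pvStackN_step w i hi]

-- initial state of the stack loop
theorem pvHArr_init (w : List Int) : pvHArr w w.length = List.replicate w.length none := by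
  unfold pvHArr
  apply List.ext_getElem?
  intro q
  rw [List.getElem?_map]
  by_cases hq : q < w.length
  · rw [List.getElem?_range hq, List.getElem?_replicate]
    simp only [hq, if_pos]
    rw [Option.map_some]
    cases hpg : pvPG w q with
    | none => rfl
    | some j =>
      have := (pvPGV_some w _ q j hpg).1
      show some (if w.length ≤ j then some ((j:Int)) else none) = some none
      rw [if_neg (by omega)]
  · rw [(by simp; omega : (List.range w.length)[q]? = none), List.getElem?_replicate]
    simp [hq]

theorem pvStack_init (w : List Int) : pvStack w w.length = [] := by
  unfold pvStack pvStackN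
  simp

theorem pvHLoop (w : List Int) : ∀ m : Nat, m ≤ w.length →
    (PySem.List.pyRange ((m:Int)-1) (-1) (-1)).foldl
      (fun (s : List (Option Int) × List Int) i =>
        let s' := pvA_while w i s.1 s.2
        (s'.1, i :: s'.2))
      (pvHArr w m, pvStack w m) = (pvHArr w 0, pvStack w 0) := by
  intro m
  induction m with
  | zero => rw [PySem.List.pyRange_neg_one_eq_nil (by omega)]; simp
  | succ m ih =>
    intro hm
    have hc : ((m+1 : Nat) : Int) - 1 = (m : Int) := by push_cast; ring
    rw [hc, PySem.List.pyRange_neg_one_cons (by omega), List.foldl_cons]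
    have hstep : (let s' := pvA_while w ((m:Int)) (pvHArr w (m+1)) (pvStack w (m+1))
        ((s'.1 : List (Option Int)), ((m:Int)) :: s'.2)) = (pvHArr w m, pvStack w m) :=
      pvStep_eq w m (by omega)
    have hc2 : (m : Int) - 1 = ((m : Nat) : Int) - 1 := by norm_num
    rw [show ((pvHArr w (m+1), pvStack w (m+1)) : List (Option Int) × List Int) = ((pvHArr w (m+1)), pvStack w (m+1)) from rfl]
    show (PySem.List.pyRange ((m:Int)-1) (-1) (-1)).foldl _
        (let s' := pvA_while w ((m:Int)) (pvHArr w (m+1)) (pvStack w (m+1))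
         (s'.1, ((m:Int)) :: s'.2)) = _
    rw [hstep]
    exact ih (by omega)

def pvFv (w : List Int) : Nat → Int
  | 0 => 0
  | i+1 => pvFn w i

def pvArr (n : Nat) (F : Nat → Int) (m : Nat) : List (Option Int) :=
  (List.range n).map (fun k => if k ≤ m then some (F k) else none)

theorem pvArr_getD (n : Nat) (F : Nat → Int) (m q : Nat) (hq : q < n) :
    (pvArr n F m).getD q none = if q ≤ m then some (F q) else none := by
  unfold pvArr
  rw [List.getD_eq_getElem?_getD, List.getElem?_map, List.getElem?_range hq]
  rfl

theorem pvArr_set (n : Nat) (F : Nat → Int) (m : Nat) :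
    (pvArr n F m).set (m+1) (some (F (m+1))) = pvArr n F (m+1) := by
  unfold pvArr
  apply List.ext_getElem?
  intro q
  rw [List.getElem?_set]
  by_cases hq : q < n
  · rw [List.getElem?_map, List.getElem?_range hq]
    by_cases he : m + 1 = q
    · subst he
      simp [hq]
    · simp only [if_neg he, List.getElem?_map, List.getElem?_range hq]
      rw [Option.map_some, Option.map_some]
      by_cases hle : q ≤ m
      · rw [if_pos hle, if_pos (by omega)]
      · rw [if_neg hle, if_neg (by omega)]
  · have h1 : (List.range n)[q]? = none := by simp; omega
    simp only [List.getElem?_map, h1, Option.map_none, List.length_map, List.length_range]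
    split_ifs with h2 h3 <;> simp_all <;> omega

theorem pvArr_init (n : Nat) (F : Nat → Int) (h0 : F 0 = 0) :
    PySem.List.pySetD (List.replicate n (none : Option Int)) 0 (some 0) = pvArr n F 0 := by
  rw [(by norm_num : (0:Int) = ((0:Nat):Int)), PySem.List.pySetD_natCast]
  unfold pvArr
  apply List.ext_getElem?
  intro q
  rw [List.getElem?_set, List.getElem?_map]
  by_cases hq : q < n
  · rw [List.getElem?_range hq, List.getElem?_replicate]
    by_cases he : 0 = q
    · subst he; simp [hq, h0]
    · simp [he, hq]
      omega
  · have h1 : (List.range n)[q]? = none := by simp; omega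
    rw [h1, List.getElem?_replicate]
    simp [hq]
    omega

theorem pvFGLoop (w : List Int) : ∀ d m, m + d = w.length →
    (PySem.List.pyRange ((m:Int)+1) ((w.length:Int)+1) 1).foldl
      (fun (s : List (Option Int) × List (Option Int)) i =>
        let fi : Int :=
          match PySem.List.pyGetD (pvHArr w 0) (i-1) none with
          | some hv => 1 + (PySem.List.pyGetD s.2 hv none).getD 0
          | none => 0
        let f' := PySem.List.pySetD s.1 i (some fi)
        let gi := max ((PySem.List.pyGetD s.2 (i-1) none).getD 0) fi
        (f', PySem.List.pySetD s.2 i (some gi)))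
      (pvArr (w.length+1) (pvFv w) m, pvArr (w.length+1) (pvGdp w) m)
      = (pvArr (w.length+1) (pvFv w) w.length, pvArr (w.length+1) (pvGdp w) w.length) := by
  intro d
  induction d with
  | zero =>
    intro m hm
    rw [PySem.List.pyRange_one_eq_nil (by omega)]
    simp only [List.foldl_nil]
    rw [(by omega : m = w.length)]
  | succ d ih =>
    intro m hm
    rw [PySem.List.pyRange_one_cons (by omega), List.foldl_cons]
    -- the processed index is i = (m:Int)+1
    have hgetH : PySem.List.pyGetD (pvHArr w 0) (((m:Int)+1)-1) none =
        (match pvPG w m with | some j => some ((j:Int)) | none => none) := by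
      rw [(by ring : ((m:Int)+1)-1 = ((m:Nat):Int)), PySem.List.pyGetD_natCast]
      unfold pvHArr
      rw [List.getD_eq_getElem?_getD, List.getElem?_map, List.getElem?_range (by omega),
        Option.map_some, Option.getD_some]
      cases pvPG w m with
      | none => rfl
      | some j => simp
    have hfi : (match PySem.List.pyGetD (pvHArr w 0) (((m:Int)+1)-1) none with
        | some hv => 1 + (PySem.List.pyGetD (pvArr (w.length+1) (pvGdp w) m) hv none).getD 0
        | none => 0) = pvFn w m := by
      rw [hgetH]
      cases hpg : pvPG w m with
      | none => simp [pvFn, hpg]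
      | some j =>
        have hj := (pvPGV_some w _ m j hpg).1
        show 1 + (PySem.List.pyGetD (pvArr (w.length+1) (pvGdp w) m) ((j:Nat):Int) none).getD 0 = pvFn w m
        rw [PySem.List.pyGetD_natCast, pvArr_getD _ _ _ _ (by omega), if_pos (by omega)]
        simp [pvFn, hpg]
    have hgetG : (PySem.List.pyGetD (pvArr (w.length+1) (pvGdp w) m) (((m:Int)+1)-1) none).getD 0
        = pvGdp w m := by
      rw [(by ring : ((m:Int)+1)-1 = ((m:Nat):Int)), PySem.List.pyGetD_natCast,
        pvArr_getD _ _ _ _ (by omega), if_pos (by omega)]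
      rfl
    have hsetF : PySem.List.pySetD (pvArr (w.length+1) (pvFv w) m) ((m:Int)+1) (some (pvFn w m))
        = pvArr (w.length+1) (pvFv w) (m+1) := by
      rw [(by push_cast; ring : ((m:Int)+1) = (((m+1:Nat)):Int)), PySem.List.pySetD_natCast]
      exact pvArr_set _ _ _
    have hsetG : PySem.List.pySetD (pvArr (w.length+1) (pvGdp w) m) ((m:Int)+1)
          (some (max (pvGdp w m) (pvFn w m)))
        = pvArr (w.length+1) (pvGdp w) (m+1) := by
      rw [(by push_cast; ring : ((m:Int)+1) = (((m+1:Nat)):Int)), PySem.List.pySetD_natCast,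
        ← pvGdp_succ]
      exact pvArr_set _ _ _
    show (PySem.List.pyRange ((m:Int)+1+1) ((w.length:Int)+1) 1).foldl _ _ = _
    rw [(by push_cast; ring : ((m:Int)+1+1) = (((m+1:Nat)):Int)+1)]
    have hstate : (let fi : Int :=
          match PySem.List.pyGetD (pvHArr w 0) (((m:Int)+1)-1) none with
          | some hv => 1 + (PySem.List.pyGetD (pvArr (w.length+1) (pvGdp w) m) hv none).getD 0
          | none => 0
        let f' := PySem.List.pySetD (pvArr (w.length+1) (pvFv w) m) ((m:Int)+1) (some fi)
        let gi := max ((PySem.List.pyGetD (pvArr (w.length+1) (pvGdp w) m) (((m:Int)+1)-1)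
            none).getD 0) fi
        (f', PySem.List.pySetD (pvArr (w.length+1) (pvGdp w) m) ((m:Int)+1) (some gi)))
        = (pvArr (w.length+1) (pvFv w) (m+1), pvArr (w.length+1) (pvGdp w) (m+1)) := by
      simp only [hfi, hgetG, hsetF, hsetG]
    rw [hstate]
    exact ih (m+1) (by omega)

theorem pvArr_zero_congr (n : Nat) (F G : Nat → Int) (h : F 0 = G 0) :
    pvArr n F 0 = pvArr n G 0 := by
  unfold pvArr
  apply List.map_congr_left
  intro k _
  by_cases hk : k ≤ 0
  · have : k = 0 := by omega
    subst this
    rw [h]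
  · simp [hk]

theorem pvA_eq (w : List Int) : maxNumberOfBalancedShipments1 w = pvFv w w.length := by
  unfold maxNumberOfBalancedShipments1
  simp only [PySem.List.len_eq]
  rw [show ((w.length:Int)).toNat = w.length by omega]
  rw [show ((w.length:Int)+1).toNat = w.length+1 by omega]
  rw [← pvHArr_init, ← pvStack_init, pvHLoop w w.length (le_refl _)]
  rw [show ((pvHArr w 0, pvStack w 0) : List (Option Int) × List Int).1 = pvHArr w 0 from rfl]
  rw [pvArr_init (w.length+1) (pvFv w) rfl]
  rw [show ((pvArr (w.length+1) (pvFv w) 0, pvArr (w.length+1) (pvFv w) 0) :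
        List (Option Int) × List (Option Int))
      = (pvArr (w.length+1) (pvFv w) 0, pvArr (w.length+1) (pvGdp w) 0) from by
    rw [pvArr_zero_congr (w.length+1) (pvFv w) (pvGdp w) (by simp [pvFv, pvGdp])]]
  have hloop := pvFGLoop w w.length 0 (by omega)
  rw [show (((0:Nat)):Int)+1 = 1 by norm_num] at hloop
  rw [hloop]
  rw [show ((pvArr (w.length+1) (pvFv w) w.length, pvArr (w.length+1) (pvGdp w) w.length) :
        List (Option Int) × List (Option Int)).1 = pvArr (w.length+1) (pvFv w) w.length from rfl]
  rw [PySem.List.pyGetD_natCast, pvArr_getD _ _ _ _ (by omega), if_pos (le_refl _)]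
  rfl

theorem pvRange_rev (m : Nat) :
    PySem.List.pyRange ((m:Int)-1) (-1) (-1) = ((List.range m).reverse).map (fun (k : Nat) => (k : Int)) := by
  rw [PySem.List.pyRange_neg_one]
  rw [show (((m:Int)-1) - (-1)).toNat = m by omega]
  apply List.ext_getElem (by simp)
  intro i h1 h2
  simp only [List.getElem_map, List.getElem_range, List.getElem_reverse, List.length_range]
  have hi : i < m := by simpa using h1
  push_cast [Nat.sub_sub]
  omega

theorem pvB_eq (w : List Int) : maxNumberOfBalancedShipments1_alt w =
    match pvPG w (w.length - 1) with
    | none => 0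
    | some j => 1 + (pvSt w j).1 := by
  unfold maxNumberOfBalancedShipments1_alt
  simp only [PySem.List.len_eq]
  by_cases h0 : w.length = 0
  · simp only [h0]
    rw [show ((0:Nat):Int)-2 = (-2 : Int) by norm_num,
      PySem.List.pyRange_neg_one_eq_nil (by norm_num)]
    rfl
  · obtain ⟨m, hm⟩ : ∃ m, w.length = m + 1 := ⟨w.length - 1, by omega⟩
    simp only [hm]
    rw [show (((m+1:Nat)):Int)-2 = ((m:Int))-1 by push_cast; ring, pvRange_rev]
    rw [List.find?_map]
    have hp : ((fun k => decide (PySem.List.pyGetD w ((((m+1:Nat)):Int)-1) 0 < PySem.List.pyGetD w k 0))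
          ∘ (fun (k : Nat) => (k : Int)))
        = (fun j => decide (w.getD m 0 < w.getD j 0)) := by
      funext q
      simp only [Function.comp_apply]
      rw [show (((m+1:Nat)):Int)-1 = ((m:Nat):Int) by push_cast; ring]
      simp
    rw [hp]
    show (match ((pvPG w m).map (fun (k : Nat) => (k : Int))) with
      | none => (0:Int)
      | some j => 1 + ((PySem.List.slice w (some 0) (some j)).foldl pvB_step (0, none)).1) = _
    cases hpg : pvPG w m with
    | none => simp only [Nat.add_sub_cancel, hpg]; rfl
    | some j =>
      rw [Option.map_some]
      show 1 + ((PySem.List.slice w (some 0) (some ((j:Nat):Int))).foldl pvB_step (0, none)).1 = _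
      rw [PySem.List.slice_zero_start, PySem.List.slice_to_natCast]
      simp only [Nat.add_sub_cancel, hpg]
      rfl

theorem pvMain (w : List Int) : maxNumberOfBalancedShipments1 w = maxNumberOfBalancedShipments1_alt w := by
  rw [pvA_eq, pvB_eq]
  cases hN : w.length with
  | zero => simp [pvFv, pvPG, pvPGV]
  | succ m =>
    simp only [Nat.add_sub_cancel]
    show pvFn w m = _
    cases hpg : pvPG w m with
    | none => simp [pvFn, hpg]
    | some j =>
      have hj := (pvPGV_some w _ m j hpg).1
      simp only [pvFn, hpg]
      rw [pvGdp_eq_pvSt w j (by omega)]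

-- ===== VERDICT (by name: the statement is the Claim_ definition above) =====
theorem maxNumberOfBalancedShipments1_spec : Claim_equal_maxNumberOfBalancedShipments1 := by
  intro weight _
  unfold Spec_maxNumberOfBalancedShipments1
  exact pvMain weight
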